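-- pv_equiv track=rewrite | github.com/robertsdotpm/p2pd | p2pd/cmd_tools.py | mac_arg_escape
-- ===== SOURCE A (Python) =====
-- def mac_arg_escape(arg):
--     black_list = "\"\\"
--     buf = ""
--     for ch in arg:
--         if ch in black_list:
--             buf += "\\" + ch
--         else:
--             buf += ch
--
--     return '"' + buf + '"'
-- ===== SOURCE B (Python) =====
-- def mac_arg_escape(arg):
--     return '"' + arg.replace('\\', '\\\\').replace('"', '\\"') + '"'
-- ===== Notes on version B (the rewrite author's own statement) =====
-- stated objective: idiomatic
-- what changed: Replaced the char-by-char accumulator loop with substring-membership branching by two sequential str.replace passes (backslashes doubled first, then quotes escaped) plus quote wrapping.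
import Mathlib
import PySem

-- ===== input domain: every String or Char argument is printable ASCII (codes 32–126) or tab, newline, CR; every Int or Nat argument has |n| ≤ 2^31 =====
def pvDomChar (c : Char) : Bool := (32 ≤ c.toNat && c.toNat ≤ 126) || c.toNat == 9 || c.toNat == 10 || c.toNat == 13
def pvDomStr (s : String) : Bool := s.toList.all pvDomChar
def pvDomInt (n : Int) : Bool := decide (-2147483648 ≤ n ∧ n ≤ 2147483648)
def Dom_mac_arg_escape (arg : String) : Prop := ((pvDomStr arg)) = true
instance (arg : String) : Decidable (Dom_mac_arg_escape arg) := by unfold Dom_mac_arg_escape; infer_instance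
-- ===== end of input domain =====

-- B replaces A's char-by-char accumulator loop by two sequential str.replace passes
-- (double backslashes first, then escape quotes) — more idiomatic; return value only.

-- ===== PORT A =====
-- buf is accumulated as a List Char (Python string concatenation, char by char)
def mac_arg_escape (arg : String) : String :=
  let black_list : List Char := "\"\\".toList
  let buf : List Char := arg.toList.foldl
    (fun buf ch =>
      if PySem.Chars.isIn [ch] black_list then buf ++ ['\\', ch] else buf ++ [ch]) []
  String.ofList ('"' :: buf ++ ['"'])

-- ===== PORT B =====
def mac_arg_escape_alt (arg : String) : String :=
  "\"" ++ PySem.Str.replace (PySem.Str.replace arg "\\" "\\\\") "\"" "\\\"" ++ "\""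

-- ===== PRECONDITION & SPEC =====
def Spec_mac_arg_escape (arg : String) (out : String) : Prop := out = mac_arg_escape_alt arg
instance (arg : String) (out : String) : Decidable (Spec_mac_arg_escape arg out) := by unfold Spec_mac_arg_escape; infer_instance

-- ===== CLAIM (what is proved, stated in full; the proofs are below) =====
def Claim_equal_mac_arg_escape : Prop := ∀ (arg : String), Dom_mac_arg_escape arg → Spec_mac_arg_escape arg (mac_arg_escape arg)

-- ===== LEMMAS AND PROOFS =====

-- replace with a single-char pattern is flatMap of a pointwise substitution
theorem pv_go_single (o : Char) (new : List Char) :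
    ∀ (l : List Char) (fuel : Nat) (acc : List Char), l.length ≤ fuel →
      PySem.Chars.replace.go [o] new fuel l acc
        = acc.reverse ++ l.flatMap (fun c => if c = o then new else [c]) := by
  intro l
  induction l with
  | nil => intro fuel acc _; cases fuel <;> simp [PySem.Chars.replace.go]
  | cons c t ih =>
      intro fuel acc h
      cases fuel with
      | zero => simp at h
      | succ f =>
          simp only [PySem.Chars.replace.go]
          by_cases hc : c = o
          · subst hc
            have hpre : List.isPrefixOf [c] (c :: t) = true := by
              simp [List.isPrefixOf]
            simp only [hpre, if_pos, List.length_cons, List.length_nil,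
              Nat.zero_add, List.drop_succ_cons, List.drop_zero]
            rw [ih f (new.reverse ++ acc) (by simpa using h)]
            simp
          · have hpre : List.isPrefixOf [c] (c :: t) = true := by simp [List.isPrefixOf]
            have hpre' : List.isPrefixOf [o] (c :: t) = false := by
              simp [List.isPrefixOf]; exact fun h' => hc h'.symm
            simp only [hpre', Bool.false_eq_true, if_neg, not_false_iff]
            rw [ih f (c :: acc) (by simpa using h)]
            simp [hc]

theorem pv_replace_single (s : List Char) (o : Char) (new : List Char) :
    PySem.Chars.replace s [o] new = s.flatMap (fun c => if c = o then new else [c]) := by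
  simp only [PySem.Chars.replace, List.isEmpty_cons, Bool.false_eq_true, if_neg,
    not_false_iff]
  simpa using pv_go_single o new s s.length [] (le_refl _)

-- A's loop builds the flatMap of its per-char expansion
theorem pv_foldl_flatMap (f : Char → Bool) :
    ∀ (s acc : List Char),
      s.foldl (fun buf ch => if f ch then buf ++ ['\\', ch] else buf ++ [ch]) acc
        = acc ++ s.flatMap (fun ch => if f ch then ['\\', ch] else [ch]) := by
  intro s
  induction s with
  | nil => simp
  | cons c t ih =>
      intro acc
      by_cases h : f c <;> simp [h, ih]

theorem pv_isIn_black (c : Char) :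
    PySem.Chars.isIn [c] ['"', '\\'] = (c == '"' || c == '\\') := by
  by_cases h1 : c = '"'
  · subst h1; decide
  · by_cases h2 : c = '\\'
    · subst h2; decide
    · have : ¬ ([c] <:+: ['"', '\\']) := by
        intro h
        have := h.sublist
        rw [List.singleton_sublist] at this
        simp [h1, h2] at this
      simp [(PySem.Chars.isIn_eq_false_iff _ _).mpr this, h1, h2]

-- the two sequential substitutions compose into A's single one
theorem pv_compose (s : List Char) :
    ((s.flatMap (fun c => if c = '\\' then ['\\', '\\'] else [c])).flatMap
        (fun c => if c = '"' then ['\\', '"'] else [c]))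
      = s.flatMap (fun c => if c == '"' || c == '\\' then ['\\', c] else [c]) := by
  induction s with
  | nil => rfl
  | cons c t ih =>
      by_cases h1 : c = '\\'
      · subst h1; simp [ih]
      · by_cases h2 : c = '"'
        · subst h2; simp [ih]
        · simp [h1, h2, ih]

-- ===== VERDICT (by name: the statement is the Claim_ definition above) =====
theorem mac_arg_escape_spec : Claim_equal_mac_arg_escape := by
  intro arg _
  unfold Spec_mac_arg_escape mac_arg_escape mac_arg_escape_alt
  apply String.toList_injective
  have h1 : ("\\" : String).toList = ['\\'] := by decide
  have h2 : ("\\\\" : String).toList = ['\\', '\\'] := by decide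
  have h3 : ("\"" : String).toList = ['"'] := by decide
  have h4 : ("\\\"" : String).toList = ['\\', '"'] := by decide
  have hb : ("\"\\" : String).toList = ['"', '\\'] := by decide
  simp only [PySem.Str.replace, String.toList_ofList, String.toList_append,
    h1, h2, h3, h4, hb]
  rw [pv_replace_single, pv_replace_single,
    pv_foldl_flatMap (fun ch => PySem.Chars.isIn [ch] ['"', '\\']) arg.toList [],
    pv_compose]
  simp [pv_isIn_black]
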